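-- pv_equiv track=rewrite | github.com/Gaming-Linux-FR/GLF-OS | patches/calamares-nixos-extensions/modules/nixos/main.py | generate_prime_entries
-- ===== SOURCE A (Python) =====
-- def generate_prime_entries(vga_devices):
--     output_lines = ""
--     for pci_address, description in vga_devices:
--         if "intel" in description.lower():
--             var_name = "intelBusId"
--         elif "nvidia" in description.lower():
--             var_name = "nvidiaBusId"
--         elif "amd" in description.lower():
--             var_name = "amdgpuBusId"
--         else:
--             continue
--         output_lines += f"    # {description}\n"
--         output_lines += f"    {var_name} = \"{pci_address}\";\n"
--     return output_lines
-- ===== SOURCE B (Python) =====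
-- _RULES = (("intel", "intelBusId"), ("nvidia", "nvidiaBusId"), ("amd", "amdgpuBusId"))
--
-- def generate_prime_entries(vga_devices):
--     # Recursive decomposition: entry for the first device prepended to the
--     # result computed for the rest of the list (built back-to-front).
--     if not vga_devices:
--         return ""
--     (pci_address, description) = vga_devices[0]
--     tail = generate_prime_entries(vga_devices[1:])
--     desc = description.lower()
--     for keyword, var_name in _RULES:
--         if keyword in desc:
--             return f"    # {description}\n    {var_name} = \"{pci_address}\";\n" + tail
--     return tail
-- ===== Notes on version B (the rewrite author's own statement) =====
-- stated objective: alternative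
-- what changed: Replaces A's iterative loop with a growing string accumulator by a structural recursion that computes the result for the tail first and prepends the head device's entry (built back-to-front), classifying each device by a first-match scan over an ordered rule table instead of the if/elif chain.
import Mathlib
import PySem

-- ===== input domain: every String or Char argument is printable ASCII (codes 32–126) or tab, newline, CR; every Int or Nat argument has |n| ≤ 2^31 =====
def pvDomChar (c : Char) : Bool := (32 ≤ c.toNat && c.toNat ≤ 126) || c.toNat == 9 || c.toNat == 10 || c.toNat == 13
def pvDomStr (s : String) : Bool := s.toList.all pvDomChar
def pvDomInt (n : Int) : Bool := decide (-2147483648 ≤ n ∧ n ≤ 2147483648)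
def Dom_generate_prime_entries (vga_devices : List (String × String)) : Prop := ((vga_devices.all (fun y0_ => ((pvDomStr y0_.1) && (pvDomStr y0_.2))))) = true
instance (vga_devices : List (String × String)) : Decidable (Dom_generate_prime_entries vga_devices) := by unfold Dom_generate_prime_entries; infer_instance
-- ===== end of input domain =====

-- B replaces A's iterative string accumulation by a structural recursion that builds
-- the output back-to-front, with a rule-table scan for classification (alternative).

-- ===== PORT A =====
def generate_prime_entries (vga_devices : List (String × String)) : String :=
  vga_devices.foldl (fun output_lines dev =>
    let pci_address := dev.1
    let description := dev.2
    if PySem.Str.isIn "intel" (PySem.Str.lower description) then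
      output_lines ++ ("    # " ++ description ++ "\n")
        ++ ("    " ++ "intelBusId" ++ " = \"" ++ pci_address ++ "\";\n")
    else if PySem.Str.isIn "nvidia" (PySem.Str.lower description) then
      output_lines ++ ("    # " ++ description ++ "\n")
        ++ ("    " ++ "nvidiaBusId" ++ " = \"" ++ pci_address ++ "\";\n")
    else if PySem.Str.isIn "amd" (PySem.Str.lower description) then
      output_lines ++ ("    # " ++ description ++ "\n")
        ++ ("    " ++ "amdgpuBusId" ++ " = \"" ++ pci_address ++ "\";\n")
    else
      output_lines) ""

-- ===== PORT B =====
def pvRules : List (String × String) :=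
  [("intel", "intelBusId"), ("nvidia", "nvidiaBusId"), ("amd", "amdgpuBusId")]

-- the inner `for keyword, var_name in _RULES:` loop of Source B, with `tail` as the
-- fall-through value of both `return` paths
def pvScanRules : List (String × String) → String → String → String → String → String
  | [], _, _, _, tail => tail
  | (keyword, var_name) :: rest, desc, description, pci_address, tail =>
    if PySem.Str.isIn keyword desc then
      ("    # " ++ description ++ "\n    " ++ var_name ++ " = \"" ++ pci_address ++ "\";\n") ++ tail
    else pvScanRules rest desc description pci_address tail

def generate_prime_entries_alt : List (String × String) → String
  | [] => ""
  | (pci_address, description) :: rest =>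
    let tail := generate_prime_entries_alt rest
    let desc := PySem.Str.lower description
    pvScanRules pvRules desc description pci_address tail

-- ===== PRECONDITION & SPEC =====
def Spec_generate_prime_entries (vga_devices : List (String × String)) (out : String) : Prop := out = generate_prime_entries_alt vga_devices
instance (vga_devices : List (String × String)) (out : String) : Decidable (Spec_generate_prime_entries vga_devices out) := by unfold Spec_generate_prime_entries; infer_instance

-- ===== CLAIM (what is proved, stated in full; the proofs are below) =====
def Claim_equal_generate_prime_entries : Prop := ∀ (vga_devices : List (String × String)), Dom_generate_prime_entries vga_devices → Spec_generate_prime_entries vga_devices (generate_prime_entries vga_devices)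

-- ===== LEMMAS AND PROOFS =====
theorem pv_main (l : List (String × String)) (acc : String) :
    l.foldl (fun output_lines dev =>
      let pci_address := dev.1
      let description := dev.2
      if PySem.Str.isIn "intel" (PySem.Str.lower description) then
        output_lines ++ ("    # " ++ description ++ "\n")
          ++ ("    " ++ "intelBusId" ++ " = \"" ++ pci_address ++ "\";\n")
      else if PySem.Str.isIn "nvidia" (PySem.Str.lower description) then
        output_lines ++ ("    # " ++ description ++ "\n")
          ++ ("    " ++ "nvidiaBusId" ++ " = \"" ++ pci_address ++ "\";\n")
      else if PySem.Str.isIn "amd" (PySem.Str.lower description) then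
        output_lines ++ ("    # " ++ description ++ "\n")
          ++ ("    " ++ "amdgpuBusId" ++ " = \"" ++ pci_address ++ "\";\n")
      else
        output_lines) acc
    = acc ++ generate_prime_entries_alt l := by
  induction l generalizing acc with
  | nil => simp [generate_prime_entries_alt]
  | cons dev t ih =>
    obtain ⟨p, d⟩ := dev
    simp only [List.foldl_cons, generate_prime_entries_alt, pvRules, pvScanRules]
    by_cases h1 : PySem.Str.isIn "intel" (PySem.Str.lower d) = true
    · simp only [h1, if_true]
      rw [ih, ← String.toList_inj]; simp
    · rw [Bool.not_eq_true] at h1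
      by_cases h2 : PySem.Str.isIn "nvidia" (PySem.Str.lower d) = true
      · simp only [h1, h2, Bool.false_eq_true, if_true, if_false]
        rw [ih, ← String.toList_inj]; simp
      · rw [Bool.not_eq_true] at h2
        by_cases h3 : PySem.Str.isIn "amd" (PySem.Str.lower d) = true
        · simp only [h1, h2, h3, Bool.false_eq_true, if_true, if_false]
          rw [ih, ← String.toList_inj]; simp
        · rw [Bool.not_eq_true] at h3
          simp only [h1, h2, h3, Bool.false_eq_true, if_false, ih]

-- ===== VERDICT (by name: the statement is the Claim_ definition above) =====
theorem generate_prime_entries_spec : Claim_equal_generate_prime_entries := by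
  intro v _
  unfold Spec_generate_prime_entries generate_prime_entries
  simpa using pv_main v ""
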